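-- pv_equiv track=rewrite | github.com/dheberer/puzzle-hunt-tools | test_broda_words.py | count_uniques
-- ===== SOURCE A (Python) =====
-- def count_uniques(word):
--   letter_count = {}
--   for c in word:
--     if c in letter_count:
--       letter_count[c] += 1
--     else:
--       letter_count[c] = 1
--
--   uniques = 0
--   for v in letter_count.values():
--     if v == 1:
--       uniques += 1
--
--   return (uniques > 1)
-- ===== SOURCE B (Python) =====
-- def count_uniques(word):
--   s = sorted(word)
--   n = len(s)
--   singles = 0
--   i = 0
--   while i < n:
--     c = s[i]
--     run = 1
--     i += 1
--     while i < n and s[i] == c: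
--       run += 1
--       i += 1
--     if run == 1:
--       singles += 1
--   return (singles > 1)
-- ===== Notes on version B (the rewrite author's own statement) =====
-- stated objective: alternative
-- what changed: Replaces the frequency-dictionary pass plus a pass over its values by sorting the word and scanning consecutive equal runs, counting runs of length one.
import Mathlib
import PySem

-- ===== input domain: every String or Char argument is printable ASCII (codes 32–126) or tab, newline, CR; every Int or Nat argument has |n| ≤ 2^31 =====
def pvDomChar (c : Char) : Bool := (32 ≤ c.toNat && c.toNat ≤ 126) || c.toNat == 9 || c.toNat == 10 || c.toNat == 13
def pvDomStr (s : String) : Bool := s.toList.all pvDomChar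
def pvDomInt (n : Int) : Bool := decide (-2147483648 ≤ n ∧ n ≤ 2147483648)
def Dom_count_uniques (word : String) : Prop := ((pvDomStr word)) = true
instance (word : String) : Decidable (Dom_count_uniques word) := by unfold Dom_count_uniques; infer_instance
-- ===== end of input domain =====

-- B sorts the word and counts length-one runs in one scan, instead of A's frequency dictionary plus a pass over its values.


-- ===== PORT A =====
def count_uniques (word : String) : Bool :=
  let letter_count := word.toList.foldl
    (fun d c => if d.contains c then d.insert c (d.getD c 0 + 1) else d.insert c 1)
    (PySem.Dict.empty : PySem.Dict Char Int)
  let uniques := letter_count.values.foldl (fun u v => if v == 1 then u + 1 else u) (0 : Int)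
  decide (uniques > 1)

-- ===== PORT B =====
-- the inner while loop of Source B: consume the run of characters equal to c, extending run
def pvConsume (c : Char) (run : Int) (s : List Char) : Int × List Char :=
  match s with
  | [] => (run, [])
  | d :: t => if d == c then pvConsume c (run + 1) t else (run, d :: t)

theorem pvConsume_snd_len (c : Char) (run : Int) (s : List Char) :
    (pvConsume c run s).2.length ≤ s.length := by
  induction s generalizing run with
  | nil => simp [pvConsume]
  | cons d t ih =>
    simp only [pvConsume]
    split
    · exact le_trans (ih _) (Nat.le_succ _)
    · simp

-- the outer while loop of Source B: one iteration per run of the sorted list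
def pvScan (s : List Char) : Int :=
  match s with
  | [] => 0
  | c :: t =>
    let r := pvConsume c 1 t
    (if r.1 == 1 then 1 else 0) + pvScan r.2
termination_by s.length
decreasing_by
  simpa using Nat.lt_succ_of_le (pvConsume_snd_len c 1 t)

def count_uniques_alt (word : String) : Bool :=
  decide (pvScan (PySem.List.sorted word.toList (fun x => x) false) > 1)

-- ===== PRECONDITION & SPEC =====
def Spec_count_uniques (word : String) (out : Bool) : Prop := out = count_uniques_alt word
instance (word : String) (out : Bool) : Decidable (Spec_count_uniques word out) := by unfold Spec_count_uniques; infer_instance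

-- ===== CLAIM (what is proved, stated in full; the proofs are below) =====
def Claim_equal_count_uniques : Prop := ∀ (word : String), Dom_count_uniques word → Spec_count_uniques word (count_uniques word)

-- ===== LEMMAS AND PROOFS =====

theorem pvConsume_eq (c : Char) (run : Int) (s : List Char) :
    pvConsume c run s = (run + (s.takeWhile (· == c)).length, s.dropWhile (· == c)) := by
  induction s generalizing run with
  | nil => simp [pvConsume]
  | cons d t ih =>
    by_cases h : d = c
    · subst h; simp [pvConsume, ih]; ring
    · simp [pvConsume, h]

-- countP agrees on two duplicate-free lists with the same members
theorem countP_nodup_ext (p : Char → Bool) {l₁ l₂ : List Char}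
    (n₁ : l₁.Nodup) (n₂ : l₂.Nodup) (h : ∀ a, a ∈ l₁ ↔ a ∈ l₂) :
    l₁.countP p = l₂.countP p :=
  ((List.perm_ext_iff_of_nodup n₁ n₂).mpr h).countP_eq p

-- c does not occur after its own run in a sorted list
theorem not_mem_dropWhile_of_sorted (c : Char) (rest : List Char)
    (hp : rest.Pairwise (· ≤ ·)) (hge : ∀ x ∈ rest, c ≤ x) :
    c ∉ rest.dropWhile (· == c) := by
  have hs : (rest.dropWhile (· == c)).Sublist rest := List.dropWhile_sublist _
  have hp' : (rest.dropWhile (· == c)).Pairwise (· ≤ ·) := hp.sublist hs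
  cases hu : rest.dropWhile (· == c) with
  | nil => simp
  | cons d t =>
    have hd : ¬ (d == c) = true := by
      have := List.head?_dropWhile_not (p := (· == c)) (l := rest)
      rw [hu] at this; simpa using this
    have hdc : d ≠ c := by simpa using hd
    have hcd : c < d := lt_of_le_of_ne (hge d (hs.subset (hu ▸ List.mem_cons_self))) (Ne.symm hdc)
    rw [hu] at hp'
    intro hmem
    rcases List.mem_cons.mp hmem with h | h
    · exact hdc h.symm
    · exact absurd ((List.pairwise_cons.mp hp').1 c h) (not_le.mpr hcd)

-- master lemma: on a sorted list, pvScan counts the distinct letters occurring exactly once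
theorem pvScan_spec_aux : ∀ (n : Nat) (s : List Char), s.length ≤ n → s.Pairwise (· ≤ ·) →
    pvScan s = ((PySem.List.dedup s).countP (fun k => s.count k == 1) : Int) := by
  intro n
  induction n with
  | zero =>
    intro s hl _
    have : s = [] := List.length_eq_zero_iff.mp (Nat.le_zero.mp hl)
    subst this; simp [pvScan, PySem.List.dedup]
  | succ n ih =>
    intro s hl hp
    cases s with
    | nil => simp [pvScan, PySem.List.dedup]
    | cons c rest =>
      have hge : ∀ x ∈ rest, c ≤ x := (List.pairwise_cons.mp hp).1
      have hpr : rest.Pairwise (· ≤ ·) := (List.pairwise_cons.mp hp).2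
      set t1 := rest.takeWhile (· == c) with ht1
      set u := rest.dropWhile (· == c) with hu
      have hall : ∀ x ∈ t1, x = c := by
        intro x hx
        have := List.mem_takeWhile_imp hx
        simpa using this
      have hcu : c ∉ u := not_mem_dropWhile_of_sorted c rest hpr hge
      have hpu : u.Pairwise (· ≤ ·) := hpr.sublist (List.dropWhile_sublist _)
      have hlu : u.length ≤ n := by
        have h1 : u.length ≤ rest.length := (List.dropWhile_sublist _).length_le
        have h2 : rest.length ≤ n := by simpa using Nat.le_of_succ_le_succ hl
        exact le_trans h1 h2
      have hsplit : t1 ++ u = rest := List.takeWhile_append_dropWhile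
      -- counts
      have hcount_c : (c :: rest).count c = 1 + t1.length := by
        have hct1 : t1.count c = t1.length :=
          List.count_eq_length.mpr (fun b hb => (hall b hb).symm)
        have hcu0 : u.count c = 0 := List.count_eq_zero.mpr hcu
        rw [List.count_cons_self, ← hsplit, List.count_append, hct1, hcu0]
        omega
      have hcount_ne : ∀ k, k ≠ c → (c :: rest).count k = u.count k := by
        intro k hk
        have hkt1 : t1.count k = 0 :=
          List.count_eq_zero.mpr (fun hmem => hk (hall k hmem))
        rw [← hsplit]
        simp [List.count_append, hkt1, Ne.symm hk]
      -- membership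
      have hmem : ∀ a, a ∈ c :: rest ↔ a ∈ c :: u := by
        intro a
        constructor
        · intro h
          rcases List.mem_cons.mp h with h | h
          · exact List.mem_cons.mpr (Or.inl h)
          · rw [← hsplit] at h
            rcases List.mem_append.mp h with h | h
            · exact List.mem_cons.mpr (Or.inl (hall a h))
            · exact List.mem_cons.mpr (Or.inr h)
        · intro h
          rcases List.mem_cons.mp h with h | h
          · exact List.mem_cons.mpr (Or.inl h)
          · exact List.mem_cons.mpr (Or.inr ((List.dropWhile_sublist _).subset h))
      -- unfold pvScan one step
      have hscan : pvScan (c :: rest) =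
          (if ((1 : Int) + t1.length == 1) then 1 else 0) + pvScan u := by
        rw [pvScan, pvConsume_eq]
      -- RHS transformation
      have hnodup1 : (PySem.List.dedup (c :: rest)).Nodup := PySem.List.nodup_dedup _
      have hnodup2 : (c :: PySem.List.dedup u).Nodup := by
        refine List.nodup_cons.mpr ⟨?_, PySem.List.nodup_dedup _⟩
        rw [PySem.List.mem_dedup]; exact hcu
      have hmem' : ∀ a, a ∈ PySem.List.dedup (c :: rest) ↔ a ∈ c :: PySem.List.dedup u := by
        intro a
        rw [PySem.List.mem_dedup, hmem a, List.mem_cons, List.mem_cons, PySem.List.mem_dedup]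
      have hR : (PySem.List.dedup (c :: rest)).countP (fun k => (c :: rest).count k == 1)
          = (c :: PySem.List.dedup u).countP (fun k => (c :: rest).count k == 1) :=
        countP_nodup_ext _ hnodup1 hnodup2 hmem'
      have hRtail : (PySem.List.dedup u).countP (fun k => (c :: rest).count k == 1)
          = (PySem.List.dedup u).countP (fun k => u.count k == 1) := by
        apply List.countP_congr
        intro k hk
        have hku : k ∈ u := (PySem.List.mem_dedup _ _).mp hk
        have hkc : k ≠ c := fun h => hcu (h ▸ hku)
        rw [hcount_ne k hkc]
      have hIH : pvScan u = ((PySem.List.dedup u).countP (fun k => u.count k == 1) : Int) :=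
        ih u hlu hpu
      rw [hscan, hIH, hR, List.countP_cons, hRtail, hcount_c]
      by_cases ht : t1.length = 0
      · simp [ht]
        omega
      · have h1 : ((1 : Int) + (t1.length : Int) == 1) = false := beq_eq_false_iff_ne.mpr (by omega)
        have h2 : ((1 + t1.length : Nat) == 1) = false := beq_eq_false_iff_ne.mpr (by omega)
        simp [h1, h2]

-- characterisation of A's two loops
theorem count_uniques_eq (word : String) :
    count_uniques word =
      decide ((((PySem.List.dedup word.toList).countP (fun k => word.toList.count k == 1)) : Int) > 1) := by
  unfold count_uniques
  dsimp only []
  have hstep : (fun (d : PySem.Dict Char Int) c =>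
        if d.contains c then d.insert c (d.getD c 0 + 1) else d.insert c 1)
      = fun d c => d.insert c (d.getD c 0 + 1) := by
    funext d c
    by_cases h : d.contains c = true
    · simp [h]
    · have h' : d.contains c = false := by simpa using h
      rw [if_neg (by simp [h']), PySem.Dict.getD_of_not_contains d 0 h']
      norm_num
  rw [hstep, PySem.Dict.foldl_insert_getD_add_one_eq_counter]
  have hvals : (PySem.Dict.counter word.toList).values
      = (PySem.List.dedup word.toList).map (fun k => ((word.toList.count k : Int))) := by
    have h := PySem.Dict.items_counter word.toList
    simp [PySem.Dict.values, h]
  rw [hvals, PySem.List.foldl_count_if, List.countP_map]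
  have : ((PySem.List.dedup word.toList).countP ((fun v => v == 1) ∘ fun k => ((word.toList.count k : Int))))
      = (PySem.List.dedup word.toList).countP (fun k => word.toList.count k == 1) := by
    apply List.countP_congr
    intro k _
    simp only [Function.comp]
    constructor
    · intro hbeq
      have : (word.toList.count k : Int) = 1 := by simpa using hbeq
      simpa using (by exact_mod_cast this : word.toList.count k = 1)
    · intro hbeq
      have : word.toList.count k = 1 := by simpa using hbeq
      simp [this]
  rw [this]
  norm_num

-- ===== VERDICT (by name: the statement is the Claim_ definition above) =====
theorem count_uniques_spec : Claim_equal_count_uniques := by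
  intro word _
  unfold Spec_count_uniques count_uniques_alt
  set l := word.toList with hl
  set s := PySem.List.sorted l (fun x => x) false with hs
  have hpair : s.Pairwise (· ≤ ·) := PySem.List.sorted_pairwise l (fun x => x)
  have hperm : s.Perm l := PySem.List.sorted_perm l (fun x => x) false
  have h1 : pvScan s = ((PySem.List.dedup s).countP (fun k => s.count k == 1) : Int) :=
    pvScan_spec_aux s.length s le_rfl hpair
  have h2 : (PySem.List.dedup s).countP (fun k => s.count k == 1)
      = (PySem.List.dedup s).countP (fun k => l.count k == 1) := by
    apply List.countP_congr
    intro k _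
    rw [hperm.count_eq]
  have h3 : (PySem.List.dedup s).countP (fun k => l.count k == 1)
      = (PySem.List.dedup l).countP (fun k => l.count k == 1) := by
    apply countP_nodup_ext _ (PySem.List.nodup_dedup _) (PySem.List.nodup_dedup _)
    intro a
    rw [PySem.List.mem_dedup, PySem.List.mem_dedup]
    exact hperm.mem_iff
  rw [count_uniques_eq, h1, h2, h3]
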